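-- pv_equiv track=rewrite | github.com/hiel/algorithm | Kakao/2020/word_search.py | solution
-- ===== SOURCE A (Python) =====
-- def solution(words, queries):
--     answer = []
--
--     for query in queries:
--         answ = 0
--         temp_words = words.copy()
--         index_ary = []
--         for i in range(0, len(query)):
--             if query[i] == '?':
--                 index_ary.append(i)
--
--         for j, word in enumerate(temp_words):
--             if len(query) == len(word):
--                 s = list(word)
--                 for index in index_ary:
--                     s[index] = '?'
--                 temp_words[j] = ''.join(s)
--
--         for word in temp_words:
--             if query == word:
--                 answ += 1
--
--         answer.append(answ)
--
--     return answer
-- ===== SOURCE B (Python) =====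
-- def solution(words, queries):
--     buckets = {}
--     for w in words:
--         buckets.setdefault(len(w), []).append(w)
--     return [len([w for w in buckets.get(len(q), [])
--                  if all(qc == '?' or qc == wc for qc, wc in zip(q, w))])
--             for q in queries]
-- ===== Notes on version B (the rewrite author's own statement) =====
-- stated objective: simpler
-- what changed: A copies the whole word list per query, rewrites each same-length word by masking its chars at the query's '?' positions and then counts string equalities; B builds a length->words bucket dict once, and for each query counts, only in the bucket of its own length, the words matching a direct per-char zip predicate (q=='?' or q==w) - no list copy, no masking, no string rebuilding.
import Mathlib
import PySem

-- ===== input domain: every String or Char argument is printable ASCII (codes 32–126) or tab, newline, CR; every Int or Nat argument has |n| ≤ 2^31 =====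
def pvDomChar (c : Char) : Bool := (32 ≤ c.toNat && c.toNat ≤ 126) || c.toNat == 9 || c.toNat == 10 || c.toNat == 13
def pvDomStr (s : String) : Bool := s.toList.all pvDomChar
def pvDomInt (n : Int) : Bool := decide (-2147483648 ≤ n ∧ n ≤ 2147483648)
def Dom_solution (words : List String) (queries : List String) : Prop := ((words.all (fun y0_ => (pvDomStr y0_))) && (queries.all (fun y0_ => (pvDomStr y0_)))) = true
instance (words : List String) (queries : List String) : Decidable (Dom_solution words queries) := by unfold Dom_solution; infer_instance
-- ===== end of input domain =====

-- B replaces A's per-query copy/mask/rebuild of the whole word list by a length-bucketed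
-- dict built once plus a direct zip predicate per query (objective: simpler).

-- ===== PORT A =====
-- A's per-query body, step for step: collect the '?' positions of the query (query[i] is
-- always in range, so List.getD is exact), mask each same-length word at those positions
-- via repeated element assignment, then count the masked words equal to the query.
def answA (words : List String) (query : String) : Int :=
  let q := query.toList
  let index_ary : List Nat :=
    (List.range q.length).foldl (fun acc i => if q.getD i ' ' == '?' then acc ++ [i] else acc) []
  let temp_words : List (List Char) := words.map (fun word =>
    let w := word.toList
    if q.length = w.length then index_ary.foldl (fun s index => s.set index '?') w else w)
  temp_words.foldl (fun a w => if q == w then a + 1 else a) 0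

def solution (words : List String) (queries : List String) : List Int :=
  queries.foldl (fun answer query => answer ++ [answA words query]) []

-- ===== PORT B =====
def wsMatch (q w : List Char) : Bool := (q.zip w).all (fun p => p.1 == '?' || p.1 == p.2)

-- buckets.setdefault(len(w), []).append(w) leaves buckets[len(w)] = old-list ++ [w]
-- (key position unchanged), which is exactly Dict.modify len(w) [] (· ++ [w]).
def solution_alt (words : List String) (queries : List String) : List Int :=
  let buckets : PySem.Dict Nat (List (List Char)) :=
    words.foldl (fun d w => d.modify w.toList.length [] (· ++ [w.toList])) PySem.Dict.empty
  queries.map (fun query =>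
    let q := query.toList
    (((buckets.getD q.length []).filter (fun w => wsMatch q w)).length : Int))

-- ===== PRECONDITION & SPEC =====
def Spec_solution (words : List String) (queries : List String) (out : List Int) : Prop := out = solution_alt words queries
instance (words : List String) (queries : List String) (out : List Int) : Decidable (Spec_solution words queries out) := by unfold Spec_solution; infer_instance

-- ===== CLAIM (what is proved, stated in full; the proofs are below) =====
def Claim_equal_solution : Prop := ∀ (words : List String) (queries : List String), Dom_solution words queries → Spec_solution words queries (solution words queries)

-- ===== LEMMAS AND PROOFS =====

-- after folding `set i '?'` over a list of indices, position j holds '?' iff j ∈ I (and in range)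
theorem foldl_set_getElem? (I : List Nat) (s : List Char) (j : Nat) :
    (I.foldl (fun s i => s.set i '?') s)[j]? =
      if j ∈ I ∧ j < s.length then some '?' else s[j]? := by
  induction I generalizing s with
  | nil => simp
  | cons i I ih =>
    simp only [List.foldl_cons, ih, List.length_set, List.getElem?_set, List.mem_cons]
    by_cases hij : i = j <;> by_cases hjI : j ∈ I <;> by_cases hjl : j < s.length <;>
      simp [hij, hjI, hjl] <;> omega

-- A's index_ary is the filter of the index range
theorem indexAry_eq (q : List Char) :
    (List.range q.length).foldl (fun acc i => if q.getD i ' ' == '?' then acc ++ [i] else acc) []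
      = (List.range q.length).filter (fun i => q.getD i ' ' == '?') := by
  simpa using PySem.List.foldl_append_if (fun i => q.getD i ' ' == '?') (fun i => i)
    (List.range q.length) []

-- A's masking of a same-length word is pointwise masking
theorem mask_eq_zipWith (q w : List Char) (hlen : q.length = w.length) :
    ((List.range q.length).filter (fun i => q.getD i ' ' == '?')).foldl
        (fun s index => s.set index '?') w
      = List.zipWith (fun qc wc => if qc = '?' then '?' else wc) q w := by
  apply List.ext_getElem?
  intro j
  rw [foldl_set_getElem?, List.getElem?_zipWith]
  by_cases hj : j < q.length
  · have hjw : j < w.length := hlen ▸ hj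
    have hq : q[j]? = some q[j] := List.getElem?_eq_getElem hj
    have hw : w[j]? = some w[j] := List.getElem?_eq_getElem hjw
    have hd : q.getD j ' ' = q[j] := by
      simp [List.getD_eq_getElem?_getD, hq]
    by_cases hc : q[j] = '?'
    · simp [List.mem_filter, List.mem_range, hj, hjw, hc]
    · simp [List.mem_filter, List.mem_range, hj, hjw, hc]
  · have hjw : ¬ j < w.length := fun h => hj (hlen ▸ h)
    have hq : q[j]? = none := List.getElem?_eq_none (by omega)
    have hw : w[j]? = none := List.getElem?_eq_none (by omega)
    simp [List.mem_filter, List.mem_range, hj, hjw]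

-- pointwise masking yields the query back iff the wildcard predicate holds
theorem zipWith_eq_left_iff (q w : List Char) (hlen : q.length = w.length) :
    (List.zipWith (fun qc wc => if qc = '?' then '?' else wc) q w = q) ↔ wsMatch q w = true := by
  induction q generalizing w with
  | nil => cases w <;> simp [wsMatch]
  | cons qc qt ih =>
    cases w with
    | nil => simp at hlen
    | cons wc wt =>
      have hlen' : qt.length = wt.length := by simpa using hlen
      by_cases hc : qc = '?'
      · simp [wsMatch, List.zip_cons_cons, hc, ih wt hlen', wsMatch]
      · have hc' : (qc == '?') = false := by simpa using hc
        simp only [List.zipWith_cons_cons, List.cons.injEq, wsMatch, List.zip_cons_cons,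
          List.all_cons, hc, if_false, Bool.and_eq_true, hc',
          Bool.false_or, beq_iff_eq]
        constructor
        · rintro ⟨h1, h2⟩
          exact ⟨h1.symm, (ih wt hlen').mp h2⟩
        · rintro ⟨h1, h2⟩
          exact ⟨h1.symm, (ih wt hlen').mpr h2⟩

-- per-query: A's count equals B's bucket count
theorem perQuery (words : List String) (query : String) :
    answA words query
      = ((((words.foldl (fun d w => d.modify w.toList.length [] (· ++ [w.toList]))
              (PySem.Dict.empty (κ := Nat))).getD query.toList.length []).filter
            (fun w => wsMatch query.toList w)).length : Int) := by
  unfold answA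
  rw [PySem.List.foldl_count_if, zero_add, List.countP_map]
  rw [← List.foldl_map (f := fun w : String => (w.toList.length, w.toList))
        (g := fun (d : PySem.Dict Nat (List (List Char))) p => d.modify p.1 [] (· ++ [p.2]))]
  rw [PySem.Dict.getD_foldl_modify_append, PySem.Dict.getD_empty, List.nil_append]
  rw [← List.countP_eq_length_filter, List.countP_map, List.countP_filter, List.countP_map]
  congr 1
  apply List.countP_congr
  intro word _
  simp only [Function.comp]
  by_cases h : query.toList.length = word.toList.length
  · rw [if_pos h, indexAry_eq, mask_eq_zipWith _ _ h]
    have hl : (word.toList.length == query.toList.length) = true := beq_iff_eq.mpr h.symm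
    rw [hl, Bool.and_true, beq_iff_eq, eq_comm, zipWith_eq_left_iff _ _ h]
  · rw [if_neg h]
    simp only [beq_iff_eq, Bool.and_eq_true]
    constructor
    · intro he
      exact (h (congrArg List.length he)).elim
    · rintro ⟨-, hl⟩
      exact (h hl.symm).elim

-- ===== VERDICT (by name: the statement is the Claim_ definition above) =====
theorem solution_spec : Claim_equal_solution := by
  intro words queries _
  unfold Spec_solution solution solution_alt
  rw [PySem.List.foldl_append_singleton_eq_map, List.nil_append]
  apply List.map_congr_left
  intro query _
  exact perQuery words query
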